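-- pv_equiv track=rewrite | github.com/candyer/exercises | the_only_one_left.py | the_only_one_left
-- ===== SOURCE A (Python) =====
-- def the_only_one_left(nums):
-- 	while len(nums) > 1:
-- 		tmp = []
-- 		for i, num in enumerate(nums):
-- 			if (i + 1) % 2 == 0:
-- 				tmp.append(num)
-- 		nums = tmp
-- 	return nums[0]
-- ===== SOURCE B (Python) =====
-- def the_only_one_left(nums):
--     # The survivor is the element at index p-1, where p is the largest
--     # power of two not exceeding len(nums).
--     return nums[(1 << (len(nums).bit_length() - 1)) - 1]
-- ===== Notes on version B (the rewrite author's own statement) =====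
-- stated objective: faster
-- what changed: Replaces the repeated halving loop with a closed-form index lookup: the survivor is nums[p-1] for p the largest power of two <= len(nums), computed from bit_length.
import Mathlib
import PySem

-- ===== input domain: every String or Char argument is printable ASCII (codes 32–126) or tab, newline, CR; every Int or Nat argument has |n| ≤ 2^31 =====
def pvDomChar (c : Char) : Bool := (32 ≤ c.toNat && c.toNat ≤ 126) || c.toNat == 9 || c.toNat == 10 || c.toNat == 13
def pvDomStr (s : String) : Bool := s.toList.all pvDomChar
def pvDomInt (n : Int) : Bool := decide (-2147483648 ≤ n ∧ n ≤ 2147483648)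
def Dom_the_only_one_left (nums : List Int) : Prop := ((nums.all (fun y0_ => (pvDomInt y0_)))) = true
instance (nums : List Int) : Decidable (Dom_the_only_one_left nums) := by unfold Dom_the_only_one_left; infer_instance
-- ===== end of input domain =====

-- B replaces A's repeated halving loop by a closed-form lookup at index 2^(bit_length-1) - 1 (asymptotically faster).

-- ===== PORT A =====
-- one pass of A's while body: tmp = [num for i,num in enumerate(nums) if (i+1)%2 == 0]
def pvStepA (nums : List Int) : List Int :=
  (PySem.List.enumerate nums).foldl
    (fun tmp p => if PySem.Int.mod (p.1 + 1) 2 == 0 then tmp ++ [p.2] else tmp) []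

-- structural description of one pass, used only for the termination measure of the port
def pvOdd : List Int → List Int
  | [] => []
  | [_] => []
  | _ :: y :: t => y :: pvOdd t

theorem pvOdd_length (l : List Int) : (pvOdd l).length = l.length / 2 := by
  induction l using pvOdd.induct with
  | case1 => simp [pvOdd]
  | case2 => simp [pvOdd]
  | case3 x y t ih => simp [pvOdd, ih]; omega

theorem pvStepA_eq_aux (l : List Int) (s : Int) (hs : s % 2 = 0) :
    ((PySem.List.enumerate l s).filter (fun p => PySem.Int.mod (p.1 + 1) 2 == 0)).map (·.2)
      = pvOdd l := by
  induction l using pvOdd.induct generalizing s with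
  | case1 => simp [pvOdd]
  | case2 x =>
      have h1 : (s + 1) % 2 ≠ 0 := by omega
      simp [PySem.List.enumerate_cons, List.filter_cons, pvOdd, h1]
  | case3 x y t ih =>
      have h1 : (s + 1) % 2 ≠ 0 := by omega
      have h2 : (s + 1 + 1) % 2 = 0 := by omega
      have h3 : (s + 2) % 2 = 0 := by omega
      simp [PySem.List.enumerate_cons, List.filter_cons, pvOdd, h1, h2]
      have := ih (s + 2) h3
      simpa [show s + 1 + 1 = s + 2 by ring] using this

theorem pvStepA_eq (l : List Int) : pvStepA l = pvOdd l := by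
  unfold pvStepA
  rw [PySem.List.foldl_append_if]
  simpa using pvStepA_eq_aux l 0 (by decide)


theorem pvStepA_length_lt (l : List Int) (h : 1 < l.length) :
    (pvStepA l).length < l.length := by
  rw [pvStepA_eq, pvOdd_length]; omega

def the_only_one_left (nums : List Int) : Int :=
  if h : 1 < nums.length then
    the_only_one_left (pvStepA nums)
  else
    (PySem.List.pyGet? nums 0).getD 0
termination_by nums.length
decreasing_by exact pvStepA_length_lt nums h

-- ===== PORT B =====
def the_only_one_left_alt (nums : List Int) : Int :=
  (PySem.List.pyGet? nums
    ((1 : Int) <<< (PySem.Int.bitLength (nums.length : Int) - 1) - 1)).getD 0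

-- ===== PRECONDITION & SPEC =====
-- A raises IndexError (and B's 1 << -1 raises ValueError) on the empty list.
def Pre_the_only_one_left (nums : List Int) : Prop := nums ≠ []
instance (nums : List Int) : Decidable (Pre_the_only_one_left nums) := by unfold Pre_the_only_one_left; infer_instance
def pvWitness_the_only_one_left : List Int := [3, 1, 4, 1, 5]

def Spec_the_only_one_left (nums : List Int) (out : Int) : Prop := out = the_only_one_left_alt nums
instance (nums : List Int) (out : Int) : Decidable (Spec_the_only_one_left nums out) := by unfold Spec_the_only_one_left; infer_instance

-- ===== CLAIM (what is proved, stated in full; the proofs are below) =====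
def Claim_equal_the_only_one_left : Prop := ∀ (nums : List Int), Dom_the_only_one_left nums → Pre_the_only_one_left nums → Spec_the_only_one_left nums (the_only_one_left nums)

-- ===== LEMMAS AND PROOFS =====

theorem pvOdd_getElem? (l : List Int) (i : Nat) :
    (pvOdd l)[i]? = l[2 * i + 1]? := by
  induction l using pvOdd.induct generalizing i with
  | case1 => simp [pvOdd]
  | case2 x => simp [pvOdd]
  | case3 x y t ih =>
      cases i with
      | zero => simp [pvOdd]
      | succ j =>
          have : 2 * (j + 1) + 1 = (2 * j + 1) + 1 + 1 := by omega
          simp [pvOdd, this, ih]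

theorem pv_main (n : Nat) : ∀ (l : List Int), l.length = n → l ≠ [] →
    the_only_one_left l
      = (l[2 ^ (PySem.Int.bitLength (l.length : Int) - 1) - 1]?).getD 0 := by
  induction n using Nat.strong_induction_on with
  | _ n ih =>
    intro l hn hne
    rw [the_only_one_left]
    by_cases h : 1 < l.length
    · simp only [h, dif_pos]
      rw [pvStepA_eq]
      have hlen : (pvOdd l).length = l.length / 2 := pvOdd_length l
      have hne' : pvOdd l ≠ [] := by
        intro hc; rw [hc] at hlen; simp at hlen; omega
      rw [ih (pvOdd l).length (by omega) (pvOdd l) rfl hne']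
      have hbl : PySem.Int.bitLength (l.length : Int)
          = PySem.Int.bitLength ((l.length / 2 : Nat) : Int) + 1 :=
        PySem.Int.bitLength_natCast (by omega)
      rw [hlen, pvOdd_getElem?]
      have hk : 1 ≤ 2 ^ (PySem.Int.bitLength ((l.length / 2 : Nat) : Int) - 1) :=
        Nat.one_le_two_pow
      have hidx : 2 * (2 ^ (PySem.Int.bitLength ((l.length / 2 : Nat) : Int) - 1) - 1) + 1
          = 2 ^ (PySem.Int.bitLength (l.length : Int) - 1) - 1 := by
        rw [hbl]
        have h2 : PySem.Int.bitLength ((l.length / 2 : Nat) : Int) + 1 - 1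
            = (PySem.Int.bitLength ((l.length / 2 : Nat) : Int) - 1) + 1 := by
          have hrec : PySem.Int.bitLength ((l.length / 2 : Nat) : Int)
              = PySem.Int.bitLength ((l.length / 2 / 2 : Nat) : Int) + 1 :=
            PySem.Int.bitLength_natCast (by omega)
          omega
        rw [h2, pow_succ]
        omega
      rw [hidx]
    · simp only [h, dif_neg]
      have h1 : l.length = 1 := by
        cases l with
        | nil => exact absurd rfl hne
        | cons a t => simp at h ⊢; omega
      have : PySem.Int.bitLength ((l.length : Nat) : Int) = 1 := by
        rw [h1]; decide
      rw [this]
      simp [PySem.List.pyGet?_zero]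

theorem pv_pow_shift (k : Nat) : (1 : Int) <<< k = ((2 ^ k : Nat) : Int) := by
  rw [Int.shiftLeft_eq, one_mul]
  push_cast
  rfl

-- ===== VERDICT (by name: the statement is the Claim_ definition above) =====
theorem the_only_one_left_spec : Claim_equal_the_only_one_left := by
  intro nums _ hne
  unfold Spec_the_only_one_left the_only_one_left_alt
  rw [pv_main nums.length nums rfl hne]
  set k := PySem.Int.bitLength (nums.length : Int) - 1 with hk
  have hpow : 1 ≤ 2 ^ k := Nat.one_le_two_pow
  have : (1 : Int) <<< k - 1 = ((2 ^ k - 1 : Nat) : Int) := by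
    rw [pv_pow_shift]; omega
  rw [this, PySem.List.pyGet?_natCast]
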